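-- pv_equiv track=rewrite | github.com/SimonHegele/SEA | Bitarrays.py | lexicographical_position
-- ===== SOURCE A (Python) =====
-- import math
--
-- def number_of_ones(bit_array):
--     count = 0
--     for i in range(len(bit_array)):
--         if bit_array[i]==1:
--             count+=1
--     return count
--
-- def lexicographical_position(a):
--     n = len(a)
--     k = number_of_ones(a)
--     lex_pos=0
--     for i in range(n):
--         if a[i] == 1:
--             lex_pos += math.comb(n-1,k)
--             n -= 1
--             k -= 1
--         else:
--             n -= 1
--             if(k==n):
--                 break
--     return(lex_pos)
-- ===== SOURCE B (Python) =====
-- import math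
--
-- def lexicographical_position(a):
--     res = 0
--     c = 0
--     for t, bit in enumerate(reversed(a)):
--         if bit == 1:
--             res += math.comb(t, c + 1)
--             c += 1
--     return res
-- ===== Notes on version B (the rewrite author's own statement) =====
-- stated objective: alternative
-- what changed: B scans the array right-to-left with a running count of ones seen so far, adding comb(positions_after, ones_after+1) at each set bit; it needs no upfront length/ones counting pass, no mutable n/k counters and no early break, unlike A's left-to-right loop.
import Mathlib
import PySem

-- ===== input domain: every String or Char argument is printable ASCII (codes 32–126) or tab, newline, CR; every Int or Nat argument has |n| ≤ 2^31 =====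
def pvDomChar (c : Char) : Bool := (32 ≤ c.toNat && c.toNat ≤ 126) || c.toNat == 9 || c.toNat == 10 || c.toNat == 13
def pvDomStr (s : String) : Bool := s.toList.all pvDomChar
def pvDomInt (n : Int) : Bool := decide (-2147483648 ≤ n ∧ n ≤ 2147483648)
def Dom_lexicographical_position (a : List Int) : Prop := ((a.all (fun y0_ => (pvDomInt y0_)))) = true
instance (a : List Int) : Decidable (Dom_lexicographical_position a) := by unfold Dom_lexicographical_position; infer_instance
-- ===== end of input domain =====

-- B scans the array right-to-left with a running count of ones already seen, adding
-- comb(t, c+1) at each set bit; no upfront length/ones pass, no n/k counters, no break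
-- (objective: alternative decomposition).

-- math.comb(n, k); exact for 0 ≤ n, 0 ≤ k — the only arguments either program reaches.
def pyComb (n k : Int) : Int := (n.toNat.choose k.toNat : Int)

-- ===== PORT A =====
def number_of_ones (a : List Int) : Int :=
  a.foldl (fun c x => if x = 1 then c + 1 else c) 0

-- the for-loop of A: state (n, k, lex_pos); returning lex is the 'break'
def lexAuxA : List Int → Int → Int → Int → Int
  | [], _, _, lex => lex
  | x :: rest, n, k, lex =>
    if x = 1 then lexAuxA rest (n - 1) (k - 1) (lex + pyComb (n - 1) k)
    else if k = n - 1 then lex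
    else lexAuxA rest (n - 1) k lex

def lexicographical_position (a : List Int) : Int :=
  lexAuxA a (a.length : Int) (number_of_ones a) 0

-- ===== PORT B =====
-- the for-loop of B over enumerate(reversed(a)): state (res, c), t is the enumerate index
def lexicographical_position_alt (a : List Int) : Int :=
  let st := (PySem.List.enumerate a.reverse).foldl
    (fun (st : Int × Int) tb =>
      if tb.2 = 1 then (st.1 + pyComb tb.1 (st.2 + 1), st.2 + 1) else st)
    (0, 0)
  st.1

-- ===== PRECONDITION & SPEC =====
def Spec_lexicographical_position (a : List Int) (out : Int) : Prop := out = lexicographical_position_alt a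
instance (a : List Int) (out : Int) : Decidable (Spec_lexicographical_position a out) := by unfold Spec_lexicographical_position; infer_instance

-- ===== CLAIM (what is proved, stated in full; the proofs are below) =====
def Claim_equal_lexicographical_position : Prop := ∀ (a : List Int), Dom_lexicographical_position a → Spec_lexicographical_position a (lexicographical_position a)

-- ===== LEMMAS AND PROOFS =====

-- number of elements equal to 1
def cnt (l : List Int) : Nat := l.countP (fun x => x = 1)

-- common recursive characterisation of the rank
def S : List Int → Int
  | [] => 0
  | x :: rest => (if x = 1 then (rest.length.choose (cnt rest + 1) : Int) else 0) + S rest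

theorem cnt_le_length (l : List Int) : cnt l ≤ l.length := List.countP_le_length

theorem S_all_ones : ∀ l : List Int, cnt l = l.length → S l = 0 := by
  intro l
  induction l with
  | nil => intro _; rfl
  | cons x rest ih =>
    intro h
    have hle := cnt_le_length rest
    by_cases hx : x = 1
    · have hcx : cnt (x :: rest) = cnt rest + 1 := by simp [cnt, hx]
      have hr : cnt rest = rest.length := by
        rw [hcx, List.length_cons] at h; omega
      simp [S, hx, hr, ih hr]
    · have hcx : cnt (x :: rest) = cnt rest := by simp [cnt, hx]
      rw [hcx, List.length_cons] at h; omega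

theorem A_gen : ∀ (l : List Int) (lex : Int),
    lexAuxA l (l.length : Int) ((cnt l : Nat) : Int) lex = lex + S l := by
  intro l
  induction l with
  | nil => intro lex; simp [lexAuxA, S]
  | cons x rest ih =>
    intro lex
    by_cases hx : x = 1
    · have hc : cnt (x :: rest) = cnt rest + 1 := by
        simp [cnt, hx]
      have h1 : ((rest.length + 1 : Nat) : Int) - 1 = (rest.length : Int) := by push_cast; ring
      have h2 : ((cnt rest + 1 : Nat) : Int) - 1 = ((cnt rest : Nat) : Int) := by push_cast; ring
      have hcomb : pyComb ((rest.length : Int)) ((cnt rest + 1 : Nat) : Int)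
          = (rest.length.choose (cnt rest + 1) : Int) := by
        simp [pyComb]
      simp only [lexAuxA, if_pos hx, List.length_cons, hc, h1, h2, hcomb, S, ih]
      ring
    · have hc : cnt (x :: rest) = cnt rest := by
        simp [cnt, hx]
      have h1 : (((x :: rest).length : Nat) : Int) - 1 = (rest.length : Int) := by
        push_cast [List.length_cons]; ring
      by_cases hk : ((cnt (x :: rest) : Nat) : Int) = (((x :: rest).length : Nat) : Int) - 1
      · have hr : cnt rest = rest.length := by
          rw [hc, h1] at hk; exact_mod_cast hk
        simp only [lexAuxA, if_neg hx, if_pos hk]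
        simp [S, hx, S_all_ones rest hr]
      · simp only [lexAuxA, if_neg hx, if_neg hk]
        rw [h1, hc, ih lex]
        simp [S, hx]

theorem number_of_ones_eq (a : List Int) : number_of_ones a = ((cnt a : Nat) : Int) := by
  unfold number_of_ones cnt
  induction a using List.reverseRecOn with
  | nil => simp
  | append_singleton xs x ih =>
    simp only [List.foldl_append, List.foldl_cons, List.foldl_nil, ih, List.countP_append,
      List.countP_cons, List.countP_nil]
    by_cases hx : x = 1 <;> simp [hx]

-- rank contribution of l when c ones and t positions already lie strictly to its right
def T : List Int → Nat → Nat → Int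
  | [], _, _ => 0
  | x :: rest, c, t =>
    (if x = 1 then ((t + rest.length).choose (c + cnt rest + 1) : Int) else 0) + T rest c t

theorem T_zero_eq_S : ∀ l : List Int, T l 0 0 = S l := by
  intro l
  induction l with
  | nil => rfl
  | cons x rest ih => simp [T, S, ih]

-- folding B's step over l.reverse processes l back-to-front
theorem B_gen : ∀ (l : List Int) (r : Int) (c t : Nat),
    (PySem.List.enumerate l.reverse (t : Int)).foldl
      (fun (st : Int × Int) tb =>
        if tb.2 = 1 then (st.1 + pyComb tb.1 (st.2 + 1), st.2 + 1) else st)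
      (r, (c : Int))
    = (r + T l c t, ((c + cnt l : Nat) : Int)) := by
  intro l
  induction l with
  | nil => intro r c t; simp [PySem.List.enumerate_nil, T, cnt]
  | cons x rest ih =>
    intro r c t
    have hrev : (x :: rest).reverse = rest.reverse ++ [x] := by simp
    have hlen : rest.reverse.length = rest.length := List.length_reverse
    rw [hrev, PySem.List.enumerate_append, List.foldl_append, ih r c t]
    simp only [hlen, PySem.List.enumerate_cons, PySem.List.enumerate_nil, List.foldl_cons,
      List.foldl_nil]
    by_cases hx : x = 1
    · have hcomb : pyComb ((t : Int) + (rest.length : Int)) (((c + cnt rest : Nat) : Int) + 1)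
          = ((t + rest.length).choose (c + cnt rest + 1) : Int) := by
        simp only [pyComb, Int.natCast_inj]
        congr 1
      have hc : cnt (x :: rest) = cnt rest + 1 := by simp [cnt, hx]
      simp only [if_pos hx, hcomb, T, hc, Prod.mk.injEq]
      refine ⟨by ring, by push_cast; ring⟩
    · have hc : cnt (x :: rest) = cnt rest := by simp [cnt, hx]
      simp [T, hx, hc]

-- ===== VERDICT (by name: the statement is the Claim_ definition above) =====
theorem lexicographical_position_spec : Claim_equal_lexicographical_position := by
  intro a _
  unfold Spec_lexicographical_position lexicographical_position lexicographical_position_alt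
  rw [number_of_ones_eq, A_gen]
  have hb := B_gen a 0 0 0
  simp only [Nat.cast_zero] at hb
  simp only [hb, T_zero_eq_S]
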